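-- pv_equiv track=rewrite | github.com/xile42/codeforces-python | templates/diff_array.py | diff_accumulate
-- ===== SOURCE A (Python) =====
-- from typing import List, Tuple
--
-- from collections import defaultdict
--
-- def diff_accumulate(lrws: List[Tuple[int, int, int]]) -> Tuple[List[int], List[int]]:
--     """ 更新所有操作后, 返回所有点的值 """
--
--     diff = defaultdict(int)
--     for l, r, w in lrws:
--         diff[l] += w
--         diff[r + 1] -= w  # 对于两个区间重合端点, 如(l, x)和(x, r), 若二者同时生效, 这里为r + 1, 否则(如人立刻下车)为r(建议传入时r=r-1)
--
--     xs = sorted(diff.keys())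
--     prefix = list()
--     cur = 0
--     for x in xs:
--         cur += diff[x]
--         prefix.append(cur)
--
--     return xs, prefix
-- ===== SOURCE B (Python) =====
-- from typing import List, Tuple
--
-- def diff_accumulate(lrws: List[Tuple[int, int, int]]) -> Tuple[List[int], List[int]]:
--     """ 更新所有操作后, 返回所有点的值 """
--
--     # Direct evaluation: each update contributes w on [l, +inf) and cancels it on
--     # [r+1, +inf); the value at any breakpoint x is the sum of its active contributions.
--     xs = sorted({p for l, r, _ in lrws for p in (l, r + 1)})
--     prefix = [sum(w * ((l <= x) - (r + 1 <= x)) for l, r, w in lrws) for x in xs]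
--     return xs, prefix
-- ===== Notes on version B (the rewrite author's own statement) =====
-- stated objective: alternative
-- what changed: B abandons the difference-array/prefix-sum sweep entirely: it collects the sorted distinct breakpoints and evaluates the value at each breakpoint independently by summing every update's contribution there (a stateless nested scan), instead of accumulating a running sum over a dict of deltas.
import Mathlib
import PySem

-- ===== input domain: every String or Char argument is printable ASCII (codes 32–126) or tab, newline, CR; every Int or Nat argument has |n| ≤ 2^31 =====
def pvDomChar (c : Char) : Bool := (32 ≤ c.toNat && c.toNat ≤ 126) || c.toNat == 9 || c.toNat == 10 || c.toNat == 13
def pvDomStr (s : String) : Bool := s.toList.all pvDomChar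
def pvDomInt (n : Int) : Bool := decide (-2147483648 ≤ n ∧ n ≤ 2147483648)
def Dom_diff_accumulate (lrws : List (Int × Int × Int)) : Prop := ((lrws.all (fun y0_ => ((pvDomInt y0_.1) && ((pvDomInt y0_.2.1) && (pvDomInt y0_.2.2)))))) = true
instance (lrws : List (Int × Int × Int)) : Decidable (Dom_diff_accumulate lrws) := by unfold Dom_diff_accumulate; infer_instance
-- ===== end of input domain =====

-- B drops the difference-array/prefix-sum sweep: it sorts the distinct breakpoints and evaluates the
-- value at each breakpoint independently as the sum of every update's contribution there
-- (objective: alternative algorithm, stateless O(n^2) direct evaluation instead of dict + running sum).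

-- ===== PORT A =====
def diff_accumulate (lrws : List (Int × Int × Int)) : List Int × List Int :=
  let diff := lrws.foldl (fun d t =>
      (d.modify t.1 0 (fun v => v + t.2.2)).modify (t.2.1 + 1) 0 (fun v => v - t.2.2))
    PySem.Dict.empty
  let xs := PySem.List.sorted diff.keys (fun x => x) false
  let res := xs.foldl (fun (s : Int × List Int) x =>
      (s.1 + diff.getD x 0, s.2 ++ [s.1 + diff.getD x 0])) ((0 : Int), ([] : List Int))
  (xs, res.2)

-- ===== PORT B =====
def diff_accumulate_alt (lrws : List (Int × Int × Int)) : List Int × List Int :=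
  let xs := PySem.List.sorted
    (PySem.Set.ofList (lrws.flatMap (fun t => [t.1, t.2.1 + 1]))) (fun x => x) false
  let pre := xs.map (fun x =>
    (lrws.map (fun t =>
      t.2.2 * ((if t.1 ≤ x then (1 : Int) else 0) - (if t.2.1 + 1 ≤ x then (1 : Int) else 0)))).sum)
  (xs, pre)

-- ===== PRECONDITION & SPEC =====
def Spec_diff_accumulate (lrws : List (Int × Int × Int)) (out : List Int × List Int) : Prop := out = diff_accumulate_alt lrws
instance (lrws : List (Int × Int × Int)) (out : List Int × List Int) : Decidable (Spec_diff_accumulate lrws out) := by unfold Spec_diff_accumulate; infer_instance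

-- ===== CLAIM (what is proved, stated in full; the proofs are below) =====
def Claim_equal_diff_accumulate : Prop := ∀ (lrws : List (Int × Int × Int)), Dom_diff_accumulate lrws → Spec_diff_accumulate lrws (diff_accumulate lrws)

-- ===== LEMMAS AND PROOFS =====

-- the flat event list A's dict encodes
def pvEvents (lrws : List (Int × Int × Int)) : List (Int × Int) :=
  lrws.flatMap (fun t => [(t.1, t.2.2), (t.2.1 + 1, -t.2.2)])

-- sums of deltas over events selected by position
def pvSumLE (E : List (Int × Int)) (k : Int) : Int :=
  ((E.filter (fun e => decide (e.1 ≤ k))).map (·.2)).sum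
def pvSumLT (E : List (Int × Int)) (c : Int) : Int :=
  ((E.filter (fun e => decide (e.1 < c))).map (·.2)).sum
def pvSumEQ (E : List (Int × Int)) (x : Int) : Int :=
  ((E.filter (fun e => e.1 == x)).map (·.2)).sum

theorem pv_dict_eq_events_fold (lrws : List (Int × Int × Int)) (d : PySem.Dict Int Int) :
    lrws.foldl (fun d t =>
        (d.modify t.1 0 (fun v => v + t.2.2)).modify (t.2.1 + 1) 0 (fun v => v - t.2.2)) d
    = (pvEvents lrws).foldl (fun d e => d.modify e.1 0 (fun v => v + e.2)) d := by
  induction lrws generalizing d with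
  | nil => rfl
  | cons t rest ih =>
    simp only [pvEvents, List.flatMap_cons, List.foldl_cons, List.foldl_append] at *
    rw [ih]
    simp [sub_eq_add_neg]

theorem pv_getD_events_fold (E : List (Int × Int)) (d : PySem.Dict Int Int) (x : Int) :
    (E.foldl (fun d e => d.modify e.1 0 (fun v => v + e.2)) d).getD x 0
    = d.getD x 0 + pvSumEQ E x := by
  induction E generalizing d with
  | nil => simp [pvSumEQ]
  | cons e rest ih =>
    simp only [List.foldl_cons, ih, pvSumEQ, List.filter_cons]
    by_cases h : e.1 = x
    · simp [h]; ring
    · simp [h, PySem.Dict.getD_modify, Ne.symm h]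

theorem pv_keys_events_fold (E : List (Int × Int)) :
    (E.foldl (fun d e => d.modify e.1 0 (fun v => v + e.2)) PySem.Dict.empty).keys
    = PySem.Set.ofList (E.map (·.1)) := by
  have h := PySem.Dict.keys_foldl_modify_key E (fun e => e.1) (0 : Int) (fun _ e v => v + e.2) PySem.Dict.empty
  simp only [PySem.Dict.keys_empty, PySem.Set.update_nil_left] at h
  exact h

theorem pv_filter_sum_split (l : List (Int × Int)) (p q r : (Int × Int) → Bool)
    (hiff : ∀ e ∈ l, r e = (p e || q e)) (hdisj : ∀ e ∈ l, !(p e && q e)) :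
    ((l.filter r).map (·.2)).sum = ((l.filter p).map (·.2)).sum + ((l.filter q).map (·.2)).sum := by
  induction l with
  | nil => simp
  | cons e rest ih =>
    have hr := hiff e (by simp)
    have hd := hdisj e (by simp)
    have ih' := ih (fun x hx => hiff x (by simp [hx])) (fun x hx => hdisj x (by simp [hx]))
    simp only [List.filter_cons, hr]
    cases hp : p e <;> cases hq : q e <;> simp [hp, hq] at hd ⊢ <;> simp [ih'] <;> ring

theorem pv_A_loop (E : List (Int × Int)) (ks : List Int) (c cur : Int) (pre : List Int)
    (hlb : ∀ k ∈ ks, c ≤ k) (hstrict : ks.Pairwise (· < ·))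
    (hcomp : ∀ p ∈ E.map (·.1), c ≤ p → p ∈ ks) (hcur : cur = pvSumLT E c) :
    ks.foldl (fun s x => (s.1 + pvSumEQ E x, s.2 ++ [s.1 + pvSumEQ E x])) (cur, pre)
    = (cur + (ks.map (pvSumEQ E)).sum, pre ++ ks.map (pvSumLE E)) := by
  induction ks generalizing c cur pre with
  | nil => simp
  | cons k ks ih =>
    have hck : c ≤ k := hlb k (by simp)
    have hkks : ∀ k' ∈ ks, k < k' := (List.pairwise_cons.mp hstrict).1
    have hkey : cur + pvSumEQ E k = pvSumLE E k := by
      have hsplit := pv_filter_sum_split E (fun e => decide (e.1 < c)) (fun e => e.1 == k)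
        (fun e => decide (e.1 ≤ k))
        (by
          intro e he
          have hP : e.1 ∈ E.map (·.1) := List.mem_map_of_mem he
          by_cases h1 : e.1 ≤ k
          · by_cases h2 : e.1 < c
            · simp [h1, h2]
            · have hm := hcomp e.1 hP (by omega)
              rcases List.mem_cons.mp hm with h | h
              · simp [h]
              · exfalso; have := hkks _ h; omega
          · have h2 : ¬ e.1 < c := by omega
            have h3 : ¬ (e.1 = k) := by omega
            simp [h1, h2, h3])
        (by
          intro e he
          by_cases h2 : e.1 < c
          · have h3 : ¬ (e.1 = k) := by omega
            simp [h2, h3]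
          · simp [h2])
      rw [pvSumLE, hsplit, hcur]; rw [pvSumLT, pvSumEQ]
    have hLT : pvSumLE E k = pvSumLT E (k + 1) := by
      rw [pvSumLE, pvSumLT]
      congr 2
      apply List.filter_congr
      intro e _
      simp only [decide_eq_decide]
      omega
    have ih' := ih (k + 1) (pvSumLT E (k + 1)) (pre ++ [pvSumLT E (k + 1)])
      (by intro k' hk'; have := hkks k' hk'; omega)
      (List.pairwise_cons.mp hstrict).2
      (by
        intro p hp hkp
        have hm := hcomp p hp (by omega)
        rcases List.mem_cons.mp hm with h | h
        · omega
        · exact h)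
      rfl
    have h2 : cur + pvSumEQ E k = pvSumLT E (k + 1) := by rw [hkey, hLT]
    simp only [List.foldl_cons, List.map_cons, List.sum_cons, h2]
    rw [ih']
    refine Prod.ext ?_ ?_
    · simp only []
      omega
    · simp [← hLT]

-- A's value, in canonical form
theorem pv_A_canon (lrws : List (Int × Int × Int)) :
    diff_accumulate lrws
    = (PySem.List.sorted (PySem.Set.ofList ((pvEvents lrws).map (·.1))) (fun x => x) false,
       (PySem.List.sorted (PySem.Set.ofList ((pvEvents lrws).map (·.1))) (fun x => x) false).map
         (pvSumLE (pvEvents lrws))) := by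
  have hdict := pv_dict_eq_events_fold lrws PySem.Dict.empty
  have hgetD : ∀ x, ((pvEvents lrws).foldl (fun d e => d.modify e.1 0 (fun v => v + e.2))
      PySem.Dict.empty).getD x 0 = pvSumEQ (pvEvents lrws) x := by
    intro x
    rw [pv_getD_events_fold]
    simp [PySem.Dict.getD_empty]
  simp only [diff_accumulate, hdict, pv_keys_events_fold, hgetD]
  set E := pvEvents lrws with hE
  set ks := PySem.List.sorted (PySem.Set.ofList (E.map (·.1))) (fun x => x) false with hks
  cases hcase : ks with
  | nil => simp
  | cons m t =>
    have hmem : ∀ k, k ∈ ks ↔ k ∈ PySem.Set.ofList (E.map (·.1)) := by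
      intro k; rw [hks, PySem.List.mem_sorted]
    have hlow : ∀ y ∈ PySem.Set.ofList (E.map (·.1)), m ≤ y :=
      PySem.List.key_head_sorted_le _ (fun x => x) (hks ▸ hcase)
    have hloop := pv_A_loop E ks m 0 []
      (by intro k hk; exact hlow k ((hmem k).mp hk))
      (hks ▸ PySem.List.sorted_ofList_pairwise_lt (E.map (·.1)))
      (by intro p hp _; exact (hmem p).mpr ((PySem.Set.mem_ofList _ _).mpr hp))
      (by
        rw [pvSumLT]
        have hnil : E.filter (fun e => decide (e.1 < m)) = [] := by
          rw [List.filter_eq_nil_iff]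
          intro e he
          have := hlow e.1 ((PySem.Set.mem_ofList _ _).mpr (List.mem_map_of_mem he))
          simp; omega
        rw [hnil]; simp)
    rw [hcase] at hloop
    rw [hloop]
    simp

-- B-side: the breakpoint lists agree, and direct per-point evaluation equals pvSumLE
theorem pv_events_fst (lrws : List (Int × Int × Int)) :
    (pvEvents lrws).map (·.1) = lrws.flatMap (fun t => [t.1, t.2.1 + 1]) := by
  induction lrws with
  | nil => rfl
  | cons t rest ih =>
    simp only [pvEvents, List.flatMap_cons, List.map_append, List.map_cons]
    simp only [pvEvents] at ih
    simp [ih]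

theorem pv_sumLE_direct (lrws : List (Int × Int × Int)) (x : Int) :
    pvSumLE (pvEvents lrws) x
    = (lrws.map (fun t =>
        t.2.2 * ((if t.1 ≤ x then (1 : Int) else 0) - (if t.2.1 + 1 ≤ x then (1 : Int) else 0)))).sum := by
  induction lrws with
  | nil => rfl
  | cons t rest ih =>
    rw [pvEvents, List.flatMap_cons, pvSumLE, List.filter_append, List.map_append,
        List.sum_append, List.map_cons, List.sum_cons]
    rw [pvSumLE, pvEvents] at ih
    rw [ih]
    simp only [List.filter_cons, List.filter_nil]
    by_cases h1 : t.1 ≤ x <;> by_cases h2 : t.2.1 + 1 ≤ x <;> simp [h1, h2]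

-- ===== VERDICT (by name: the statement is the Claim_ definition above) =====
theorem diff_accumulate_spec : Claim_equal_diff_accumulate := by
  intro lrws _
  unfold Spec_diff_accumulate
  rw [pv_A_canon]
  simp only [diff_accumulate_alt, ← pv_events_fst]
  exact Prod.ext rfl (List.map_congr_left (fun k _ => pv_sumLE_direct lrws k))
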